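-- pv_equiv track=rewrite | github.com/Sara-Mlh/BioAlgo-Table-des-suffixes | test_projet.py | search_pattern
-- ===== SOURCE A (Python) =====
-- def TABSUFF(chaine):
--     indexes = []
--     suffixes = []
--     for i in range(len(chaine)):
--         suffixes.append(chaine[i:])
--         indexes.append(i)
--     suffixes = sorted(suffixes) #suffixes contient les suffixes eux meme
--     indexes.sort(key=lambda x: chaine[x:])  #indexes contient les indices des suffixes dans le texte
--     return indexes, suffixes
--
-- def search_pattern(text, pattern):
--     Tabsuffix = TABSUFF(text)[1]
--     indexes = []
--     for suffix in enumerate(Tabsuffix):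
--         if pattern == suffix[1][:len(pattern)]:
--             index = len(text) - len(suffix[1])
--             indexes.append(index)      #ajouer l occurence i a la liste indexes
--     return indexes
-- ===== SOURCE B (Python) =====
-- def search_pattern(text, pattern):
--     # filter first, then sort only the k matching start positions by their suffix
--     m = len(pattern)
--     matches = [i for i in range(len(text)) if text[i:i + m] == pattern]
--     matches.sort(key=lambda i: text[i:])
--     return matches
-- ===== Notes on version B (the rewrite author's own statement) =====
-- stated objective: faster
-- what changed: A materialises and sorts all n suffix strings and then scans the whole sorted suffix array testing each suffix's prefix; B never builds the suffix array: it scans the text once collecting the k matching start positions and sorts only those k positions by their suffix.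
import Mathlib
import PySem

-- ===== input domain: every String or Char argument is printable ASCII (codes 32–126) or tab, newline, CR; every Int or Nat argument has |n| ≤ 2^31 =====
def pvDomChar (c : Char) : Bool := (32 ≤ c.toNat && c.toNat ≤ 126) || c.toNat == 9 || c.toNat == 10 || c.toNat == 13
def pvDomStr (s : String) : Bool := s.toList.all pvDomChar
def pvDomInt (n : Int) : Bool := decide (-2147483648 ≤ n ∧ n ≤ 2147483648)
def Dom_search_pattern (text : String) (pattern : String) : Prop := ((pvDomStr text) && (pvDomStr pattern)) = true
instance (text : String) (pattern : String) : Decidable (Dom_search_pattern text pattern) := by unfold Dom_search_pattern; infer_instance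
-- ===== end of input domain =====

-- B collects the matching start positions in one scan and sorts only those by their
-- suffix, instead of building and sorting all n suffixes and scanning the whole
-- sorted suffix array (objective: faster).

-- ===== PORT A =====
def TABSUFF (chaine : String) : List Int × List String :=
  let built := (PySem.List.pyRange 0 (PySem.Str.len chaine) 1).foldl
    (fun (acc : List Int × List String) i =>
      (acc.1 ++ [i], acc.2 ++ [PySem.Str.slice chaine (some i) none]))
    ([], [])
  let suffixes := PySem.List.sorted built.2 (fun s => s) false
  let indexes := PySem.List.sorted built.1 (fun x => PySem.Str.slice chaine (some x) none) false
  (indexes, suffixes)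

def search_pattern (text : String) (pattern : String) : List Int :=
  let Tabsuffix := (TABSUFF text).2
  (PySem.List.enumerate Tabsuffix).foldl
    (fun (indexes : List Int) suffix =>
      if pattern = PySem.Str.slice suffix.2 none (some (PySem.Str.len pattern)) then
        indexes ++ [PySem.Str.len text - PySem.Str.len suffix.2]
      else indexes)
    []

-- ===== PORT B =====
def search_pattern_alt (text : String) (pattern : String) : List Int :=
  let m : Int := PySem.Str.len pattern
  let matchs := (PySem.List.pyRange 0 (PySem.Str.len text) 1).filter
    (fun i => PySem.Str.slice text (some i) (some (i + m)) == pattern)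
  PySem.List.sorted matchs (fun i => PySem.Str.slice text (some i) none) false

-- ===== PRECONDITION & SPEC =====
def Spec_search_pattern (text : String) (pattern : String) (out : List Int) : Prop := out = search_pattern_alt text pattern
instance (text : String) (pattern : String) (out : List Int) : Decidable (Spec_search_pattern text pattern out) := by unfold Spec_search_pattern; infer_instance

-- ===== CLAIM (what is proved, stated in full; the proofs are below) =====
def Claim_equal_search_pattern : Prop := ∀ (text : String) (pattern : String), Dom_search_pattern text pattern → Spec_search_pattern text pattern (search_pattern text pattern)

-- ===== LEMMAS AND PROOFS =====

-- helper: A's loop over enumerate, condition/value read only from the element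
theorem foldl_enumerate_if {β : Type} (p : String → Prop) [DecidablePred p] (h : String → β)
    (l : List String) (s : Int) (acc : List β) :
    (PySem.List.enumerate l s).foldl
      (fun ind x => if p x.2 then ind ++ [h x.2] else ind) acc
    = acc ++ (l.filter (fun x => decide (p x))).map h := by
  induction l generalizing s acc with
  | nil => simp [PySem.List.enumerate_nil]
  | cons y ys ih =>
      simp only [PySem.List.enumerate_cons, List.foldl_cons, List.filter_cons]
      by_cases hy : p y
      · simp [hy, ih]
      · simp [hy, ih]


theorem toList_suffix (text : String) {i : Int} (h0 : 0 ≤ i) :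
    (PySem.Str.slice text (some i) none).toList = text.toList.drop i.toNat := by
  simp [PySem.Str.slice, PySem.Chars.slice, PySem.List.slice_from _ h0]


theorem len_suffix (text : String) {i : Int} (h0 : 0 ≤ i) (h1 : i < (text.toList.length : Int)) :
    PySem.Str.len (PySem.Str.slice text (some i) none) = (text.toList.length : Int) - i := by
  show ((PySem.Str.slice text (some i) none).toList.length : Int) = _
  rw [toList_suffix text h0, List.length_drop]
  omega

theorem prefix_eq (text pattern : String) {i : Int} (h0 : 0 ≤ i) :
    (pattern = PySem.Str.slice (PySem.Str.slice text (some i) none) none (some (PySem.Str.len pattern)))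
    ↔ (PySem.Str.slice text (some i) (some (i + PySem.Str.len pattern)) = pattern) := by
  have hm : (0:Int) ≤ PySem.Str.len pattern := by simp [PySem.Str.len]
  have h1 : (PySem.Str.slice (PySem.Str.slice text (some i) none) none (some (PySem.Str.len pattern))).toList
      = (text.toList.drop i.toNat).take (PySem.Str.len pattern).toNat := by
    rw [show (PySem.Str.slice (PySem.Str.slice text (some i) none) none (some (PySem.Str.len pattern))).toList
        = PySem.List.slice (PySem.Str.slice text (some i) none).toList none (some (PySem.Str.len pattern)) from by
      simp [PySem.Str.slice, PySem.Chars.slice]]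
    rw [toList_suffix text h0, PySem.List.slice_to _ hm]
  have harg : (i + PySem.Str.len pattern).toNat - i.toNat = (PySem.Str.len pattern).toNat := by omega
  have h2 : (PySem.Str.slice text (some i) (some (i + PySem.Str.len pattern))).toList
      = (text.toList.drop i.toNat).take (PySem.Str.len pattern).toNat := by
    rw [show (PySem.Str.slice text (some i) (some (i + PySem.Str.len pattern))).toList
        = PySem.List.slice text.toList (some i) (some (i + PySem.Str.len pattern)) from by
      simp [PySem.Str.slice, PySem.Chars.slice]]
    rw [PySem.List.slice_toNat text.toList h0 (by omega), harg]
  have hEq : PySem.Str.slice (PySem.Str.slice text (some i) none) none (some (PySem.Str.len pattern))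
      = PySem.Str.slice text (some i) (some (i + PySem.Str.len pattern)) :=
    String.toList_inj.mp (h1.trans h2.symm)
  rw [hEq]
  exact eq_comm

theorem main_eq (text pattern : String) :
    search_pattern text pattern = search_pattern_alt text pattern := by
  set f : Int → String := fun i => PySem.Str.slice text (some i) none with hf
  set m : Int := PySem.Str.len pattern with hm
  set g : String → Int := fun x => PySem.Str.len text - PySem.Str.len x with hg
  set R : List Int := PySem.List.pyRange 0 (PySem.Str.len text) 1 with hR
  set P : String → Prop := fun x => pattern = PySem.Str.slice x none (some m) with hP
  set Q : Int → Bool := fun i => (PySem.Str.slice text (some i) (some (i + m)) == pattern) with hQ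
  set S' : List String := PySem.List.sorted (R.map f) (fun s => s) false with hS'
  have hlen : PySem.Str.len text = ((text.toList.length : Nat) : Int) := rfl
  have hmemR : ∀ i ∈ R, 0 ≤ i ∧ i < (text.toList.length : Int) := by
    intro i hi
    rw [hR, PySem.List.mem_pyRange_one] at hi
    omega
  have hfold := PySem.List.foldl_prod_mk (fun (a : List Int) (i : Int) => a ++ [i])
      (fun (a : List String) (i : Int) => a ++ [PySem.Str.slice text (some i) none])
      (PySem.List.pyRange 0 (PySem.Str.len text) 1) [] []
  have hTS : (TABSUFF text).2 = S' := by
    unfold TABSUFF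
    simp only [hfold]
    rw [PySem.List.foldl_append_singleton_eq_map]
    simp [hS', hR, hf]
  -- A's value
  have hA : search_pattern text pattern
      = (S'.filter (fun x => decide (P x))).map g := by
    unfold search_pattern
    rw [hTS]
    rw [foldl_enumerate_if
      (fun x => pattern = PySem.Str.slice x none (some (PySem.Str.len pattern)))
      (fun x => PySem.Str.len text - PySem.Str.len x) S' 0 []]
    simp [hP, hg, hm]
  -- pointwise facts on R
  have hgf : ∀ i ∈ R, g (f i) = i := by
    intro i hi
    obtain ⟨h0, h1⟩ := hmemR i hi
    simp only [hg, hf, len_suffix text h0 h1, hlen]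
    omega
  have hPQ : ∀ i ∈ R, decide (P (f i)) = Q i := by
    intro i hi
    obtain ⟨h0, _⟩ := hmemR i hi
    rw [Bool.eq_iff_iff]
    simp only [decide_eq_true_eq, hP, hQ, hf, hm, beq_iff_eq]
    exact prefix_eq text pattern h0
  -- permutation
  have h1 : S'.Perm (R.map f) := PySem.List.sorted_perm _ _ _
  have h2 : (S'.filter (fun x => decide (P x))).Perm ((R.map f).filter (fun x => decide (P x))) :=
    h1.filter _
  have h3 : (R.map f).filter (fun x => decide (P x))
      = (R.filter ((fun x => decide (P x)) ∘ f)).map f := List.filter_map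
  have h4 : R.filter ((fun x => decide (P x)) ∘ f) = R.filter Q :=
    List.filter_congr (fun i hi => hPQ i hi)
  have h5 : ((R.filter Q).map f).map g = R.filter Q := by
    rw [List.map_map]
    exact (List.map_congr_left (fun i hi => by
      simpa using hgf i (List.mem_of_mem_filter hi))).trans (List.map_id _)
  have hperm : ((S'.filter (fun x => decide (P x))).map g).Perm (R.filter Q) := by
    have hp := h2.map g
    rw [h3, h4, h5] at hp
    exact hp
  -- pairwise strict
  have hRnd : R.Nodup := by
    rw [hR, hlen, PySem.List.pyRange_zero_natCast]
    exact (List.nodup_range).map (fun a b => by omega)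
  have hmapnd : (R.map f).Nodup := by
    apply List.Nodup.map_on _ hRnd
    intro i hi j hj hij
    have := hgf i hi
    rw [hij, hgf j hj] at this
    exact this.symm
  have hS'nd : S'.Nodup := h1.nodup_iff.mpr hmapnd
  have hle : S'.Pairwise (fun a b => a ≤ b) := PySem.List.sorted_pairwise _ _
  have hlt : S'.Pairwise (fun a b => a < b) :=
    (hle.and hS'nd).imp (fun h => lt_of_le_of_ne h.1 h.2)
  have hback : ∀ a ∈ S', f (g a) = a := by
    intro a ha
    obtain ⟨i, hi, rfl⟩ := List.mem_map.mp (h1.subset ha)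
    rw [hgf i hi]
  have hpair : ((S'.filter (fun x => decide (P x))).map g).Pairwise (fun a b => f a < f b) := by
    rw [List.pairwise_map]
    refine (hlt.filter _).imp_of_mem ?_
    intro a b ha hb hab
    rw [hback a (List.mem_of_mem_filter ha), hback b (List.mem_of_mem_filter hb)]
    exact hab
  -- conclude
  have hB : search_pattern_alt text pattern
      = (S'.filter (fun x => decide (P x))).map g := by
    unfold search_pattern_alt
    exact PySem.List.sorted_eq_of_perm_of_pairwise_lt _ _ _ hperm hpair
  rw [hA, hB]

-- ===== VERDICT (by name: the statement is the Claim_ definition above) =====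
theorem search_pattern_spec : Claim_equal_search_pattern := by
  intro text pattern _
  unfold Spec_search_pattern
  exact main_eq text pattern
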